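-- pv_equiv track=rewrite | github.com/jsmcel/androidfutbol5 | cli/qa_play_real_5seasons.py | _coach_matchdays
-- ===== SOURCE A (Python) =====
-- COACH_MATCHES_PER_SEASON = 2
--
-- def _coach_matchdays(total_md: int) -> set[int]:
--     if COACH_MATCHES_PER_SEASON <= 0:
--         return set()
--     if total_md <= 2:
--         return set(range(1, total_md + 1))
--
--     early = 2 if total_md >= 10 else 1
--     mid = max(early + 1, total_md // 2)
--     late = max(mid + 1, total_md - 4)
--     candidates = [early, mid, late, total_md]
--
--     out: list[int] = []
--     for md in candidates:
--         md = max(1, min(total_md, int(md)))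
--         if md not in out:
--             out.append(md)
--         if len(out) >= COACH_MATCHES_PER_SEASON:
--             break
--     return set(out)
-- ===== SOURCE B (Python) =====
-- COACH_MATCHES_PER_SEASON = 2
--
-- def _coach_matchdays(total_md: int) -> set[int]:
--     if COACH_MATCHES_PER_SEASON <= 0:
--         return set()
--     if total_md <= 2:
--         return set(range(1, total_md + 1))
--     early = 2 if total_md >= 10 else 1
--     mid = max(early + 1, total_md // 2)
--     return {early, mid}
-- ===== Notes on version B (the rewrite author's own statement) =====
-- stated objective: simpler
-- what changed: The candidate list, the clamping/dedup loop and the break counter are removed: in the main case past the two guards the loop provably always emits exactly {early, mid} (both already in range and distinct), so B returns that pair directly in closed form.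
import Mathlib
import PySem

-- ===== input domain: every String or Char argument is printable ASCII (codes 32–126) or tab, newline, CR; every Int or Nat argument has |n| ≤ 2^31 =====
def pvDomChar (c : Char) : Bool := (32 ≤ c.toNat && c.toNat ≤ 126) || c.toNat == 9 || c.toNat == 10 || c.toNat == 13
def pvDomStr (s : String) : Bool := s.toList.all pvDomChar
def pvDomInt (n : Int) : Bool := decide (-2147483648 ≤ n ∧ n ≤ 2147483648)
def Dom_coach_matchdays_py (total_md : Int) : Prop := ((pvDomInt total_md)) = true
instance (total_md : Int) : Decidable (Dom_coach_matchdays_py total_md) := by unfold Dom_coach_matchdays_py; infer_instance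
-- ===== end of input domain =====

-- B removes A's candidate list, clamping/dedup loop and break counter: in the main case the
-- result is always exactly the pair {early, mid}, returned directly (objective: simpler).

-- ===== PORT A =====
-- the for-loop over candidates with the dedup list `out` and the break at len ≥ 2
def coachLoopA (total_md : Int) : List Int → List Int → List Int
  | [], out => out
  | md :: rest, out =>
    let md' := max 1 (min total_md md)
    let out' := if md' ∈ out then out else out ++ [md']
    if 2 ≤ out'.length then out' else coachLoopA total_md rest out'

def coach_matchdays_py (total_md : Int) : List Int :=
  if (2 : Int) ≤ 0 then []
  else if total_md ≤ 2 then PySem.Set.ofList (PySem.List.pyRange 1 (total_md + 1) 1)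
  else
    let early : Int := if total_md ≥ 10 then 2 else 1
    let mid := max (early + 1) (PySem.Int.floordiv total_md 2)
    let late := max (mid + 1) (total_md - 4)
    let candidates := [early, mid, late, total_md]
    PySem.Set.ofList (coachLoopA total_md candidates [])

-- ===== PORT B =====
def coach_matchdays_py_alt (total_md : Int) : List Int :=
  if (2 : Int) ≤ 0 then []
  else if total_md ≤ 2 then PySem.Set.ofList (PySem.List.pyRange 1 (total_md + 1) 1)
  else
    let early : Int := if total_md ≥ 10 then 2 else 1
    let mid := max (early + 1) (PySem.Int.floordiv total_md 2)
    PySem.Set.ofList [early, mid]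

-- ===== PRECONDITION & SPEC =====
def Spec_coach_matchdays_py (total_md : Int) (out : List Int) : Prop := out = coach_matchdays_py_alt total_md
instance (total_md : Int) (out : List Int) : Decidable (Spec_coach_matchdays_py total_md out) := by unfold Spec_coach_matchdays_py; infer_instance

-- ===== CLAIM (what is proved, stated in full; the proofs are below) =====
def Claim_equal_coach_matchdays_py : Prop := ∀ (total_md : Int), Dom_coach_matchdays_py total_md → Spec_coach_matchdays_py total_md (coach_matchdays_py total_md)

-- ===== LEMMAS AND PROOFS =====

-- For total_md > 2, the loop on [early, mid, late, total_md] stops after two distinct in-range values.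
theorem coachLoopA_pair (total_md e m l t : Int)
    (he : 1 ≤ e) (het : e ≤ total_md) (hm : e < m) (hmt : m ≤ total_md) :
    coachLoopA total_md [e, m, l, t] [] = [e, m] := by
  have he' : max 1 (min total_md e) = e := by omega
  have hm' : max 1 (min total_md m) = m := by omega
  have hne : ¬ (m = e) := by omega
  simp [coachLoopA, he', hm', hne]

-- ===== VERDICT (by name: the statement is the Claim_ definition above) =====
theorem coach_matchdays_py_spec : Claim_equal_coach_matchdays_py := by
  intro total_md _hdom
  unfold Spec_coach_matchdays_py coach_matchdays_py coach_matchdays_py_alt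
  by_cases h2 : total_md ≤ 2
  · simp [h2]
  · have hpos : (0 : Int) < 2 := by omega
    have hdiv : PySem.Int.floordiv total_md 2 = total_md / 2 :=
      PySem.Int.floordiv_eq_ediv_of_pos hpos
    simp only [h2, if_false, if_neg (by omega : ¬ (2 : Int) ≤ 0), hdiv]
    by_cases h10 : total_md ≥ 10
    · simp only [h10, if_pos]
      rw [coachLoopA_pair] <;> omega
    · simp only [h10, ite_false]
      rw [coachLoopA_pair] <;> omega
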